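-- pv_equiv track=rewrite | github.com/fredrikzellerR/bacc | code/abba_musical_eval.py | _find_interval_or_complement
-- ===== SOURCE A (Python) =====
-- def _find_interval_or_complement(chord, lo, interval):# suche intervall drüber oder complementärintervall unter lo. chord: Midi in lowest octave, lo ebso. -> midi :int (nix = -1)
--     # intervall 7 = Qiunte 8 =kl.Sexte etc.
--     # drüber ?
--     for n in chord:
--         if (n - lo)  == interval:
--             return n;
--     intervall_comp = 12 - interval;
--     # komplement drunter
--     for n in chord:
--         if (lo - n ) == intervall_comp:
--             return n;
--
--     return -1;
-- ===== SOURCE B (Python) =====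
-- def _find_interval_or_complement(chord, lo, interval):
--     # single pass: remember first note at the interval above and first note at
--     # the complement below; 'above' wins regardless of list order, like A.
--     above = None
--     comp = None
--     for n in chord:
--         if above is None and n - lo == interval:
--             above = n
--         if comp is None and lo - n == 12 - interval:
--             comp = n
--     if above is not None:
--         return above
--     if comp is not None:
--         return comp
--     return -1
-- ===== Notes on version B (the rewrite author's own statement) =====
-- stated objective: alternative
-- what changed: Replaces A's two sequential early-return scans over chord by one single pass that maintains two 'first match' accumulators (above/complement) and decides the priority after the loop.
import Mathlib
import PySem

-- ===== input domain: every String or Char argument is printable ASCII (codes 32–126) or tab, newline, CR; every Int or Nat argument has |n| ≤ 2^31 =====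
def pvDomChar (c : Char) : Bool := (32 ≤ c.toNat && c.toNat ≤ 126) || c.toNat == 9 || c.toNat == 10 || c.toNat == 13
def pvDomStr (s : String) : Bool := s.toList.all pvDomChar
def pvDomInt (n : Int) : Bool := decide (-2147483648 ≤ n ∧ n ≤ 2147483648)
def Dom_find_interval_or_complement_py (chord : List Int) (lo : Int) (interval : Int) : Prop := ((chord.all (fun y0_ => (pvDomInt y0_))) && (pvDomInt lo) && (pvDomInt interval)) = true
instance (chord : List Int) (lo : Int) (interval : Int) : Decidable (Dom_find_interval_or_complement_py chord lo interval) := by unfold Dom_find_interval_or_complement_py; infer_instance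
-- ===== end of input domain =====

-- B fuses A's two sequential early-return scans into one pass with two 'first match' accumulators; same O(n), 'alternative' decomposition.

-- ===== PORT A =====
-- first loop of A: first n in chord with n - lo == interval
def pvALoop1 (chord : List Int) (lo : Int) (interval : Int) : Option Int :=
  match chord with
  | [] => none
  | n :: rest => if n - lo = interval then some n else pvALoop1 rest lo interval

-- second loop of A: first n in chord with lo - n == intervall_comp
def pvALoop2 (chord : List Int) (lo : Int) (intervall_comp : Int) : Option Int :=
  match chord with
  | [] => none
  | n :: rest => if lo - n = intervall_comp then some n else pvALoop2 rest lo intervall_comp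

def find_interval_or_complement_py (chord : List Int) (lo : Int) (interval : Int) : Int :=
  match pvALoop1 chord lo interval with
  | some n => n
  | none =>
    let intervall_comp := 12 - interval
    match pvALoop2 chord lo intervall_comp with
    | some n => n
    | none => -1

-- ===== PORT B =====
-- single pass carrying (above, comp)
def pvBLoop (chord : List Int) (lo : Int) (interval : Int)
    (above comp : Option Int) : Option Int × Option Int :=
  match chord with
  | [] => (above, comp)
  | n :: rest =>
    let above' := if above.isNone ∧ n - lo = interval then some n else above
    let comp' := if comp.isNone ∧ lo - n = 12 - interval then some n else comp
    pvBLoop rest lo interval above' comp'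

def find_interval_or_complement_py_alt (chord : List Int) (lo : Int) (interval : Int) : Int :=
  match pvBLoop chord lo interval none none with
  | (some a, _) => a
  | (none, some c) => c
  | (none, none) => -1

-- ===== PRECONDITION & SPEC =====
def Spec_find_interval_or_complement_py (chord : List Int) (lo : Int) (interval : Int) (out : Int) : Prop := out = find_interval_or_complement_py_alt chord lo interval
instance (chord : List Int) (lo : Int) (interval : Int) (out : Int) : Decidable (Spec_find_interval_or_complement_py chord lo interval out) := by unfold Spec_find_interval_or_complement_py; infer_instance

-- ===== CLAIM (what is proved, stated in full; the proofs are below) =====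
def Claim_equal_find_interval_or_complement_py : Prop := ∀ (chord : List Int) (lo : Int) (interval : Int), Dom_find_interval_or_complement_py chord lo interval → Spec_find_interval_or_complement_py chord lo interval (find_interval_or_complement_py chord lo interval)

-- ===== LEMMAS AND PROOFS =====
-- B's loop computes: 'above' ends as its initial value, or else the first match of loop 1; similarly 'comp'.
theorem pvBLoop_eq (chord : List Int) (lo interval : Int) :
    ∀ (a c : Option Int),
      pvBLoop chord lo interval a c =
        (a.orElse (fun _ => pvALoop1 chord lo interval),
         c.orElse (fun _ => pvALoop2 chord lo (12 - interval))) := by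
  induction chord with
  | nil => intro a c; cases a <;> cases c <;> simp [pvBLoop, pvALoop1, pvALoop2, Option.orElse]
  | cons n rest ih =>
    intro a c
    simp only [pvBLoop, pvALoop1, pvALoop2]
    rw [ih]
    cases a <;> cases c <;> split_ifs <;> simp_all [Option.orElse]

theorem find_interval_or_complement_py_spec : Claim_equal_find_interval_or_complement_py := by
  intro chord lo interval _
  unfold Spec_find_interval_or_complement_py
  unfold find_interval_or_complement_py find_interval_or_complement_py_alt
  rw [pvBLoop_eq]
  cases h1 : pvALoop1 chord lo interval <;>
    cases h2 : pvALoop2 chord lo (12 - interval) <;>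
      simp [Option.orElse, h2]
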